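-- pv_equiv track=rewrite | github.com/M1ts0sGitHub/python | Projects/1stGame/test.py | mycheck
-- ===== SOURCE A (Python) =====
-- def mycheck(a, b):
--     set_a = sorted(set(a))
--     set_b = sorted(set(b))
--     for char in set_a:
--         for char2 in set_b:
--             if char == char2:
--                 break
--             elif char > char2:
--                 return False
--     return True
-- ===== SOURCE B (Python) =====
-- def mycheck(a, b):
--     return (not a) or (not b) or max(a) <= min(b)
-- ===== Notes on version B (the rewrite author's own statement) =====
-- stated objective: simpler
-- what changed: Replaced the sort-dedup plus nested scan with a single boundary comparison: the whole predicate is just 'a empty or b empty or max(a) <= min(b)'.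
import Mathlib
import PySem

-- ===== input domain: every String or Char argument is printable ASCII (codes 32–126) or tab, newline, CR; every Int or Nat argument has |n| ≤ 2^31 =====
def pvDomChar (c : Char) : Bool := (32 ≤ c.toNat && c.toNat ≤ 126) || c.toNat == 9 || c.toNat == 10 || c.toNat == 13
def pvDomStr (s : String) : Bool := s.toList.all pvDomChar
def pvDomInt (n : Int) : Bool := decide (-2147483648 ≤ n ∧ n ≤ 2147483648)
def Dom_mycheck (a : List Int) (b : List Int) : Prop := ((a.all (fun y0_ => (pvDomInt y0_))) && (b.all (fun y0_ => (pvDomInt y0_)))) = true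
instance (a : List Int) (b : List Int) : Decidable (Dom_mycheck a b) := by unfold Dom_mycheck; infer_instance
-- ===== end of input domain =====

-- B replaces A's sorted-dedup nested scan by a single boundary comparison:
-- 'a empty or b empty or max(a) <= min(b)' (simpler; return value only, no side effects).

-- ===== PORT A =====
-- inner 'for char2 in set_b' loop: true = loop fell through / broke, false = 'return False'
def mycheckInner (x : Int) : List Int → Bool
  | [] => true
  | y :: t => if x = y then true else if x > y then false else mycheckInner x t

-- outer 'for char in set_a' loop
def mycheckOuter : List Int → List Int → Bool
  | [], _ => true
  | x :: t, sb => if mycheckInner x sb then mycheckOuter t sb else false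

def mycheck (a : List Int) (b : List Int) : Bool :=
  let set_a := PySem.List.sorted (PySem.Set.ofList a) (fun x => x) false
  let set_b := PySem.List.sorted (PySem.Set.ofList b) (fun x => x) false
  mycheckOuter set_a set_b

-- ===== PORT B =====
def mycheck_alt (a : List Int) (b : List Int) : Bool :=
  a.isEmpty || b.isEmpty ||
    (match PySem.List.max? a (fun x => x), PySem.List.min? b (fun x => x) with
     | some ma, some mb => decide (ma ≤ mb)
     | _, _ => true)

-- ===== PRECONDITION & SPEC =====
def Spec_mycheck (a : List Int) (b : List Int) (out : Bool) : Prop := out = mycheck_alt a b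
instance (a : List Int) (b : List Int) (out : Bool) : Decidable (Spec_mycheck a b out) := by unfold Spec_mycheck; infer_instance

-- ===== CLAIM (what is proved, stated in full; the proofs are below) =====
def Claim_equal_mycheck : Prop := ∀ (a : List Int) (b : List Int), Dom_mycheck a b → Spec_mycheck a b (mycheck a b)

-- ===== LEMMAS AND PROOFS =====

-- On a (≤)-sorted sb, the inner loop returns true iff x is ≤ every element of sb.
theorem mycheckInner_eq_true {x : Int} {sb : List Int} (h : sb.Pairwise (· ≤ ·)) :
    mycheckInner x sb = true ↔ ∀ y ∈ sb, x ≤ y := by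
  induction sb with
  | nil => simp [mycheckInner]
  | cons y t ih =>
    rcases List.pairwise_cons.mp h with ⟨hy, ht⟩
    by_cases hxy : x = y
    · subst hxy
      simp only [mycheckInner, List.mem_cons]
      constructor
      · intro _ z hz
        rcases hz with rfl | hz
        · exact le_refl _
        · exact hy z hz
      · intro _; simp
    · by_cases hgt : x > y
      · simp only [mycheckInner, if_neg hxy, if_pos hgt]
        constructor
        · intro h'; cases h'
        · intro h'; exact absurd (h' y (List.mem_cons_self)) (not_le.mpr hgt)
      · have hlt : x ≤ y := le_of_not_gt hgt
        simp only [mycheckInner, if_neg hxy, if_neg hgt, ih ht, List.mem_cons]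
        constructor
        · intro h' z hz
          rcases hz with rfl | hz
          · exact hlt
          · exact h' z hz
        · intro h' z hz; exact h' z (Or.inr hz)

theorem mycheckOuter_eq_true {sa sb : List Int} (h : sb.Pairwise (· ≤ ·)) :
    mycheckOuter sa sb = true ↔ ∀ x ∈ sa, ∀ y ∈ sb, x ≤ y := by
  induction sa with
  | nil => simp [mycheckOuter]
  | cons x t ih =>
    simp only [mycheckOuter, List.mem_cons]
    by_cases hx : mycheckInner x sb = true
    · simp only [if_pos hx, ih]
      constructor
      · rintro h' z (rfl | hz)
        · exact (mycheckInner_eq_true h).mp hx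
        · exact h' z hz
      · intro h' z hz; exact h' z (Or.inr hz)
    · simp only [if_neg hx]
      constructor
      · intro h'; cases h'
      · intro h'
        exact absurd ((mycheckInner_eq_true h).mpr (h' x (Or.inl rfl))) hx

theorem mycheck_eq_true (a b : List Int) :
    mycheck a b = true ↔ ∀ x ∈ a, ∀ y ∈ b, x ≤ y := by
  unfold mycheck
  have hp : (PySem.List.sorted (PySem.Set.ofList b) (fun x => x) false).Pairwise
      (fun p q => (fun x => x) p ≤ (fun x => x) q) := PySem.List.sorted_pairwise _ _
  rw [mycheckOuter_eq_true hp]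
  constructor
  · intro h x hx y hy
    exact h x (by simp [PySem.List.mem_sorted, PySem.Set.mem_ofList, hx])
             y (by simp [PySem.List.mem_sorted, PySem.Set.mem_ofList, hy])
  · intro h x hx y hy
    have hx' : x ∈ a := by
      simpa [PySem.List.mem_sorted, PySem.Set.mem_ofList] using hx
    have hy' : y ∈ b := by
      simpa [PySem.List.mem_sorted, PySem.Set.mem_ofList] using hy
    exact h x hx' y hy'

theorem mycheck_alt_eq_true (a b : List Int) :
    mycheck_alt a b = true ↔ ∀ x ∈ a, ∀ y ∈ b, x ≤ y := by
  unfold mycheck_alt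
  cases ha : a with
  | nil => simp
  | cons x0 t =>
    cases hb : b with
    | nil => simp
    | cons y0 s =>
      have hma : ∃ ma, PySem.List.max? (x0 :: t) (fun x => x) = some ma := by
        cases h : PySem.List.max? (x0 :: t) (fun x => x) with
        | none => exact absurd ((PySem.List.max?_eq_none_iff _ _).mp h) (by simp)
        | some m => exact ⟨m, rfl⟩
      have hmb : ∃ mb, PySem.List.min? (y0 :: s) (fun x => x) = some mb := by
        cases h : PySem.List.min? (y0 :: s) (fun x => x) with
        | none => exact absurd ((PySem.List.min?_eq_none_iff _ _).mp h) (by simp)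
        | some m => exact ⟨m, rfl⟩
      obtain ⟨ma, hA⟩ := hma
      obtain ⟨mb, hB⟩ := hmb
      simp only [List.isEmpty_cons, Bool.false_or, hA, hB]
      constructor
      · intro hle x hx y hy
        have h1 : x ≤ ma := PySem.List.max?_isMax hA x hx
        have h2 : mb ≤ y := PySem.List.min?_isMin hB y hy
        have h3 : ma ≤ mb := of_decide_eq_true hle
        omega
      · intro h
        exact decide_eq_true
          (h ma (PySem.List.max?_mem hA) mb (PySem.List.min?_mem hB))

-- ===== VERDICT (by name: the statement is the Claim_ definition above) =====
theorem mycheck_spec : Claim_equal_mycheck := by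
  intro a b _
  unfold Spec_mycheck
  have h1 := mycheck_eq_true a b
  have h2 := mycheck_alt_eq_true a b
  cases hA : mycheck a b <;> cases hB : mycheck_alt a b
  · rfl
  · exact absurd (h1.mpr (h2.mp hB)) (by simp [hA])
  · exact absurd (h2.mpr (h1.mp hA)) (by simp [hB])
  · rfl
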